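-- pv_equiv track=rewrite | github.com/Ashiq-am/Data-Structures-Algorithm | 1.Python Algorithms/8.Bitwise Algorithms/2.Intermediate/22.Copy set bits in a range/Example 1.py | copySetBits
-- ===== SOURCE A (Python) =====
-- def copySetBits(x, y, l, r):
--     # l and r must be between 1 to 32
--     # (assuming ints are stored using
--     # 32 bits)
--     if (l < 1 or r > 32):
--         return x;
--
--     # Traverse in given range
--     for i in range(l, r + 1):
--
--         # Find a mask (A number whose
--         # only set bit is at i'th position)
--         mask = 1 << (i - 1);
--
--         # If i'th bit is set in y, set i'th
--         # bit in x also.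
--         if ((y & mask) != 0):
--             x = x | mask;
--     return x;
-- ===== SOURCE B (Python) =====
-- def copySetBits(x, y, l, r):
--     # closed-form range mask instead of the per-bit loop
--     if l < 1 or r > 32 or l > r:
--         return x
--     mask = ((1 << r) - 1) & ~((1 << (l - 1)) - 1)
--     return x | (y & mask)
-- ===== Notes on version B (the rewrite author's own statement) =====
-- stated objective: simpler
-- what changed: Replaces the per-bit loop over i in range(l, r+1) (testing and copying one bit of y per iteration) by a single closed-form range mask ((1<<r)-1) & ~((1<<(l-1))-1) and one 'x | (y & mask)'; the AND-NOT mask form keeps the empty-range case l>r returning x unchanged.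
import Mathlib
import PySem

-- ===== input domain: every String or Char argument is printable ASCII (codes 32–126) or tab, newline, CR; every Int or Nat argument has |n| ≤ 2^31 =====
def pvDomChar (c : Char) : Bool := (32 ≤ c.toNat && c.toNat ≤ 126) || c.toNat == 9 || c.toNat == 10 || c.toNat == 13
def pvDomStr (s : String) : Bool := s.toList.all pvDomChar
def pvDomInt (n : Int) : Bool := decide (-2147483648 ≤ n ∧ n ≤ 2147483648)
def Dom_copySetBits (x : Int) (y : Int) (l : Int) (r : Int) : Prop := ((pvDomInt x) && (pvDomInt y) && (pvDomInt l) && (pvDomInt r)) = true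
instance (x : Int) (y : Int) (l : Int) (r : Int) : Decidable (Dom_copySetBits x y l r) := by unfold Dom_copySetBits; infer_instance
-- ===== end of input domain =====

-- B replaces A's per-bit copy loop by one closed-form range mask and a single OR (objective: simpler).

-- ===== PORT A =====
-- literal port of A: guard, then a loop over range(l, r+1) testing and copying one bit per step.
-- '1 << (i-1)' is ported as '1 <<< (i-1).toNat'; inside the loop l ≤ i and 1 ≤ l (guard), so
-- i-1 ≥ 0 and .toNat is exact (Python only evaluates the shift there).
def copySetBitsStep (y : Int) (x : Int) (i : Int) : Int :=
  let mask : Int := (1 : Int) <<< (i - 1).toNat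
  if PySem.Int.band y mask ≠ 0 then PySem.Int.bor x mask else x

def copySetBits (x : Int) (y : Int) (l : Int) (r : Int) : Int :=
  if l < 1 ∨ 32 < r then x
  else (PySem.List.pyRange l (r + 1) 1).foldl (copySetBitsStep y) x

-- ===== PORT B =====
-- literal port of Source B: guard (including the empty range l > r), closed-form mask, one OR.
-- shifts are only evaluated past the guard, where 1 ≤ l ≤ r, so .toNat is exact.
def copySetBits_alt (x : Int) (y : Int) (l : Int) (r : Int) : Int :=
  if l < 1 ∨ 32 < r ∨ r < l then x
  else
    let mask : Int :=
      PySem.Int.band ((1 : Int) <<< r.toNat - 1) (Int.not ((1 : Int) <<< (l - 1).toNat - 1))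
    PySem.Int.bor x (PySem.Int.band y mask)

-- ===== PRECONDITION & SPEC =====
def Spec_copySetBits (x : Int) (y : Int) (l : Int) (r : Int) (out : Int) : Prop := out = copySetBits_alt x y l r
instance (x : Int) (y : Int) (l : Int) (r : Int) (out : Int) : Decidable (Spec_copySetBits x y l r out) := by unfold Spec_copySetBits; infer_instance

-- ===== CLAIM (what is proved, stated in full; the proofs are below) =====
def Claim_equal_copySetBits : Prop := ∀ (x : Int) (y : Int) (l : Int) (r : Int), Dom_copySetBits x y l r → Spec_copySetBits x y l r (copySetBits x y l r)

-- ===== LEMMAS AND PROOFS =====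

theorem int_not_eq (n : Int) : Int.not n = -n - 1 := by
  cases n with
  | ofNat m => show Int.negSucc m = _; rw [Int.negSucc_eq, Int.ofNat_eq_natCast]; ring
  | negSucc m => show ((m : Nat) : Int) = _; rw [Int.negSucc_eq]; ring

-- a - (a &&& m) is exactly the "bits of a not in m" (Nat.ldiff)
theorem nat_sub_and_eq_ldiff (a m : Nat) : a - (a &&& m) = a.ldiff m := by
  induction a using Nat.binaryRec generalizing m with
  | zero =>
    have h0 : Nat.ldiff 0 m = 0 := by
      apply Nat.eq_of_testBit_eq; intro i
      simp [Nat.testBit_ldiff, Nat.zero_testBit]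
    simp [h0]
  | bit b a ih =>
    cases m using Nat.bitCasesOn with
    | _ c m' =>
      rw [Nat.land_bit, Nat.ldiff_bit, ← ih m']
      have h1 : a &&& m' ≤ a := Nat.and_le_left
      cases b <;> cases c <;> simp [Nat.bit_val] <;> omega

theorem ldiff_ldiff (m a b : Nat) : (m.ldiff a).ldiff b = m.ldiff (a ||| b) := by
  apply Nat.eq_of_testBit_eq; intro i
  simp only [Nat.testBit_ldiff, Nat.testBit_lor]
  cases m.testBit i <;> cases a.testBit i <;> cases b.testBit i <;> rfl

theorem ldiff_or_left (a b m : Nat) : (a.ldiff m) ||| (b.ldiff m) = (a ||| b).ldiff m := by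
  apply Nat.eq_of_testBit_eq; intro i
  simp only [Nat.testBit_ldiff, Nat.testBit_lor]
  cases a.testBit i <;> cases b.testBit i <;> cases m.testBit i <;> rfl

theorem band_nonneg_nat (y : Int) (hy : 0 ≤ y) (a : Nat) :
    PySem.Int.band y (a : Int) = ((y.toNat &&& a : Nat) : Int) := by
  rw [PySem.Int.band.eq_1]
  simp [hy, Int.toNat_natCast]

theorem band_neg_nat (y : Int) (hy : y < 0) (a : Nat) :
    PySem.Int.band y (a : Int) = ((a.ldiff (-y - 1).toNat : Nat) : Int) := by
  rw [PySem.Int.band.eq_1]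
  rw [if_neg (by omega), if_pos (Int.natCast_nonneg a)]
  rw [Int.toNat_natCast, nat_sub_and_eq_ldiff]

theorem bor_neg_nat (z : Int) (hz : z < 0) (a : Nat) :
    PySem.Int.bor z (a : Int) = -(((-z - 1).toNat.ldiff a : Nat) : Int) - 1 := by
  rw [PySem.Int.bor.eq_1]
  rw [if_neg (by omega), if_pos (Int.natCast_nonneg a)]
  rw [Int.toNat_natCast, nat_sub_and_eq_ldiff]

theorem bor_bor_nat (z : Int) (a b : Nat) :
    PySem.Int.bor (PySem.Int.bor z (a : Int)) (b : Int) = PySem.Int.bor z ((a ||| b : Nat) : Int) := by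
  by_cases hz : 0 ≤ z
  · have h1 : PySem.Int.bor z (a : Int) = ((z.toNat ||| a : Nat) : Int) := by
      rw [PySem.Int.bor.eq_1]; simp [hz, Int.toNat_natCast]
    rw [h1, PySem.Int.bor_natCast, PySem.Int.bor.eq_1]
    simp [hz, Int.toNat_natCast, Nat.lor_assoc]
  · have hz' : z < 0 := by omega
    rw [bor_neg_nat z hz' a]
    have hneg : -(((-z - 1).toNat.ldiff a : Nat) : Int) - 1 < 0 := by
      have := Int.natCast_nonneg (((-z - 1).toNat.ldiff a : Nat)); omega
    rw [bor_neg_nat _ hneg b, bor_neg_nat z hz' (a ||| b)]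
    have ht : (-(-(((-z - 1).toNat.ldiff a : Nat) : Int) - 1) - 1).toNat = (-z - 1).toNat.ldiff a := by
      omega
    rw [ht, ldiff_ldiff]

-- merging one more masked piece of y into the accumulator
theorem band_merge (x y : Int) (a b : Nat) :
    PySem.Int.bor (PySem.Int.bor x (PySem.Int.band y (a : Int))) (PySem.Int.band y (b : Int))
      = PySem.Int.bor x (PySem.Int.band y ((a ||| b : Nat) : Int)) := by
  by_cases hy : 0 ≤ y
  · rw [band_nonneg_nat y hy a, band_nonneg_nat y hy b, band_nonneg_nat y hy (a ||| b),
      bor_bor_nat, Nat.and_or_distrib_left]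
  · have hy' : y < 0 := by omega
    rw [band_neg_nat y hy' a, band_neg_nat y hy' b, band_neg_nat y hy' (a ||| b),
      bor_bor_nat, ldiff_or_left]

theorem band_two_pow (y : Int) (k : Nat) :
    PySem.Int.band y ((2 ^ k : Nat) : Int) = 0 ∨ PySem.Int.band y ((2 ^ k : Nat) : Int) = ((2 ^ k : Nat) : Int) := by
  by_cases hy : 0 ≤ y
  · rw [band_nonneg_nat y hy]
    rw [Nat.and_two_pow]
    cases y.toNat.testBit k <;> simp
  · have hy' : y < 0 := by omega
    rw [band_neg_nat y hy']
    by_cases h : ((-y - 1).toNat).testBit k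
    · left
      have h0 : (2 ^ k).ldiff (-y - 1).toNat = 0 := by
        apply Nat.eq_of_testBit_eq; intro i
        simp only [Nat.testBit_ldiff, Nat.zero_testBit, Nat.testBit_two_pow]
        by_cases hik : k = i
        · subst hik; rw [h]; simp
        · simp [hik]
      rw [h0]; simp
    · right
      have h0 : (2 ^ k).ldiff (-y - 1).toNat = 2 ^ k := by
        apply Nat.eq_of_testBit_eq; intro i
        simp only [Nat.testBit_ldiff, Nat.testBit_two_pow]
        by_cases hik : k = i
        · subst hik; rw [Bool.eq_false_iff.mpr h]; simp
        · simp [hik]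
      rw [h0]

theorem one_shiftLeft_nat (k : Nat) : (1 : Int) <<< k = ((2 ^ k : Nat) : Int) := by
  rw [Int.shiftLeft_eq]; push_cast; ring

theorem step_eq (y z : Int) (i : Int) :
    copySetBitsStep y z i = PySem.Int.bor z (PySem.Int.band y ((2 ^ (i - 1).toNat : Nat) : Int)) := by
  unfold copySetBitsStep
  rw [one_shiftLeft_nat]
  show (if PySem.Int.band y (((2 ^ (i - 1).toNat : Nat)) : Int) ≠ 0
      then PySem.Int.bor z (((2 ^ (i - 1).toNat : Nat)) : Int) else z)
    = PySem.Int.bor z (PySem.Int.band y (((2 ^ (i - 1).toNat : Nat)) : Int))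
  rcases band_two_pow y (i - 1).toNat with h | h
  · rw [h, PySem.Int.bor_zero]; simp
  · have hne : ((2 ^ (i - 1).toNat : Nat) : Int) ≠ 0 := by positivity
    rw [h, if_pos hne]

theorem mask_step (k n : Nat) :
    (2 ^ k : Nat) ||| ((2 ^ n - 1) <<< (k + 1)) = (2 ^ (n + 1) - 1) <<< k := by
  apply Nat.eq_of_testBit_eq; intro i
  simp only [Nat.testBit_lor, Nat.testBit_shiftLeft, Nat.testBit_two_pow,
    Nat.testBit_two_pow_sub_one]
  by_cases h1 : k = i
  · subst h1; simp
  · by_cases h2 : k + 1 ≤ i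
    · simp [h1, h2, show k ≤ i by omega, show i - (k + 1) < n ↔ i - k < n + 1 by omega]
    · have h3 : ¬ k ≤ i := by omega
      simp [h1, h2, h3]

theorem mask_closed (k n : Nat) :
    (2 ^ (k + n) - 1).ldiff (2 ^ k - 1) = (2 ^ n - 1) <<< k := by
  apply Nat.eq_of_testBit_eq; intro i
  simp only [Nat.testBit_ldiff, Nat.testBit_shiftLeft, Nat.testBit_two_pow_sub_one]
  by_cases h1 : k ≤ i <;> by_cases h2 : i < k + n
  · simp [h1, h2, show ¬ (i < k) from by omega, show i - k < n from by omega]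
  · simp [h1, h2, show ¬ (i < k) from by omega, show ¬ (i - k < n) from by omega]
  · simp [h1, h2, show i < k from by omega]
  · simp [h1, h2, show i < k from by omega]

-- A's loop over range(l, l+n) ORs in exactly the mask of the n bit positions from l-1 up
theorem loop_eq (y : Int) (n : Nat) : ∀ (l x : Int), 1 ≤ l →
    (PySem.List.pyRange l (l + n) 1).foldl (copySetBitsStep y) x
      = PySem.Int.bor x (PySem.Int.band y ((((2 ^ n - 1) <<< (l - 1).toNat : Nat)) : Int)) := by
  induction n with
  | zero =>
    intro l x _
    simp only [Nat.cast_zero, add_zero]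
    have hemp : PySem.List.pyRange l l 1 = [] := by
      rw [PySem.List.pyRange_one]; simp
    rw [hemp]
    simp [List.foldl, PySem.Int.band_zero, PySem.Int.bor_zero]
  | succ n ih =>
    intro l x hl
    have hlt : l < l + ((n + 1 : Nat) : Int) := by push_cast; omega
    rw [PySem.List.pyRange_one_cons hlt, List.foldl_cons]
    rw [show l + ((n + 1 : Nat) : Int) = (l + 1) + (n : Nat) from by push_cast; ring]
    rw [ih (l + 1) _ (by omega)]
    rw [step_eq y x l]
    have hlk : (l + 1 - 1).toNat = (l - 1).toNat + 1 := by omega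
    rw [hlk, band_merge, mask_step]

-- ===== VERDICT (by name: the statement is the Claim_ definition above) =====
theorem copySetBits_spec : Claim_equal_copySetBits := by
  intro x y l r _
  unfold Spec_copySetBits copySetBits copySetBits_alt
  by_cases hg : l < 1 ∨ 32 < r
  · rcases hg with h | h <;> simp [h]
  · have hl : 1 ≤ l := by omega
    have hr : r ≤ 32 := by omega
    rw [if_neg hg]
    by_cases hlr : r < l
    · rw [if_pos (by tauto)]
      have hemp : PySem.List.pyRange l (r + 1) 1 = [] := by
        rw [PySem.List.pyRange_one]
        have h0 : (r + 1 - l).toNat = 0 := by omega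
        simp [h0]
      rw [hemp]; rfl
    · rw [if_neg (by tauto)]
      set n : Nat := (r + 1 - l).toNat with hn
      rw [show r + 1 = l + (n : Int) from by omega]
      rw [loop_eq y n l x hl]
      set k : Nat := (l - 1).toNat with hk
      have hR : r.toNat = k + n := by omega
      have e1 : (1 : Int) <<< r.toNat - 1 = ((2 ^ (k + n) - 1 : Nat) : Int) := by
        rw [one_shiftLeft_nat, hR]
        have h1 : (1 : Nat) ≤ 2 ^ (k + n) := Nat.one_le_two_pow
        push_cast [h1]; ring
      have e2 : Int.not ((1 : Int) <<< (l - 1).toNat - 1) = -((2 ^ k - 1 : Nat) : Int) - 1 := by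
        rw [← hk, one_shiftLeft_nat, int_not_eq]
        have h1 : (1 : Nat) ≤ 2 ^ k := Nat.one_le_two_pow
        push_cast [h1]; ring
      rw [e1, e2]
      have hneg : -((2 ^ k - 1 : Nat) : Int) - 1 < 0 := by
        have := Int.natCast_nonneg ((2 ^ k - 1 : Nat)); omega
      rw [PySem.Int.band_comm ((2 ^ (k + n) - 1 : Nat) : Int), band_neg_nat _ hneg]
      have ht : (-(-((2 ^ k - 1 : Nat) : Int) - 1) - 1).toNat = 2 ^ k - 1 := by omega
      rw [ht, mask_closed]
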